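-- pv_equiv track=rewrite | github.com/earthai-tech/fusionlab-learn | fusionlab/tools/app/geoprior/ui/map/analytics_panel.py | _strip_q_suffix
-- ===== SOURCE A (Python) =====
-- def _strip_q_suffix(name: str) -> str:
--     n = str(name or "").strip()
--     for suf in ("_q", "_p"):
--         if suf in n:
--             left, right = n.rsplit(suf, 1)
--             if right.isdigit():
--                 return left
--     return n
-- ===== SOURCE B (Python) =====
-- def _strip_q_suffix(name: str) -> str:
--     n = str(name or "").strip()
--     i = len(n)
--     while i > 0 and n[i - 1].isdigit():
--         i -= 1
--     if i < len(n):
--         base = n[:i]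
--         for sep in ("_q", "_p"):
--             if base.endswith(sep):
--                 return base[:-2]
--     return n
-- ===== Notes on version B (the rewrite author's own statement) =====
-- stated objective: simpler
-- what changed: Instead of A's per-separator rsplit-and-validate passes over the whole string, B finds the maximal trailing digit run by one scan from the end and then only checks which of the two two-character separators the remaining text ends with.
import Mathlib
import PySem

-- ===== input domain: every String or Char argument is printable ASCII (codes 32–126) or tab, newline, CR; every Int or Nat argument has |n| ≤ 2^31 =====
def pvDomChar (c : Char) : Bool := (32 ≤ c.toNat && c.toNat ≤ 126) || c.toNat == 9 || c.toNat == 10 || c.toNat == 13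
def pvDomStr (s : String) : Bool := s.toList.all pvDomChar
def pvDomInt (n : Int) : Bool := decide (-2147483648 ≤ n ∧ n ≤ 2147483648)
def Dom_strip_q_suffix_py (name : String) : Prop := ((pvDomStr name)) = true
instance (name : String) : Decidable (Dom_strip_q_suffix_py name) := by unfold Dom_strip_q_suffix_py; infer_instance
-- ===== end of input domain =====

-- B replaces A's rsplit-per-separator passes by one scan from the end for the trailing
-- digit run followed by a suffix check of the two-char separator (simpler decomposition).

-- ===== PORT A =====
-- n.rsplit(suf, 1) for a separator that occurs in n: split at its LAST occurrence
-- (index = n.rfind(suf)); exact for a present non-empty separator.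
def pvRsplitLast (n suf : List Char) : List Char × List Char :=
  let j := (PySem.Chars.rfind n suf).toNat
  (n.take j, n.drop (j + suf.length))

-- the `for suf in ("_q", "_p")` loop with its early return
def pvSufLoop : List (List Char) → List Char → List Char
  | [], n => n
  | suf :: rest, n =>
    if PySem.Chars.isIn suf n then
      let lr := pvRsplitLast n suf
      if PySem.Chars.strIsdigit lr.2 then lr.1 else pvSufLoop rest n
    else pvSufLoop rest n

def strip_q_suffix_py (name : String) : String :=
  String.ofList (pvSufLoop [['_', 'q'], ['_', 'p']] (PySem.Chars.strip name.toList))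

-- ===== PORT B =====
-- the `while i > 0 and n[i-1].isdigit(): i -= 1` scan from the end: the maximal
-- trailing digit run is the digit prefix of the reversed list, and i = len - run.
def pvDigitRun (n : List Char) : Nat := (n.reverse.takeWhile PySem.Chars.isdigit).length

-- base[:-2] is base.take (base.length - 2) (exact also for len < 2: both give []).
def pvAltCore (n : List Char) : List Char :=
  let i := n.length - pvDigitRun n
  if i < n.length then
    let base := n.take i
    if PySem.Chars.endswith base ['_', 'q'] then base.take (base.length - 2)
    else if PySem.Chars.endswith base ['_', 'p'] then base.take (base.length - 2)
    else n
  else n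

def strip_q_suffix_py_alt (name : String) : String :=
  String.ofList (pvAltCore (PySem.Chars.strip name.toList))

-- ===== PRECONDITION & SPEC =====
def Spec_strip_q_suffix_py (name : String) (out : String) : Prop := out = strip_q_suffix_py_alt name
instance (name : String) (out : String) : Decidable (Spec_strip_q_suffix_py name out) := by unfold Spec_strip_q_suffix_py; infer_instance

-- ===== CLAIM (what is proved, stated in full; the proofs are below) =====
def Claim_equal_strip_q_suffix_py : Prop := ∀ (name : String), Dom_strip_q_suffix_py name → Spec_strip_q_suffix_py name (strip_q_suffix_py name)

-- ===== LEMMAS AND PROOFS =====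

-- a two-character list is a prefix iff the first two elements match
theorem pvPrefixTwo (c1 c2 : Char) (l : List Char) :
    ([c1, c2].isPrefixOf l = true) ↔ ∃ rest, l = c1 :: c2 :: rest := by
  cases l with
  | nil => simp [List.isPrefixOf]
  | cons a t =>
    cases t with
    | nil => simp [List.isPrefixOf]
    | cons b t' => simp [List.isPrefixOf]; aesop

theorem pvGoZero (s sub : List Char) :
    PySem.Chars.rfind.go s sub 0 = if sub.isPrefixOf s then 0 else -1 := rfl

theorem pvGoSucc (s sub : List Char) (j : Nat) :
    PySem.Chars.rfind.go s sub (j + 1) =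
      if sub.isPrefixOf (s.drop (j + 1)) then ((j + 1 : Nat) : Int)
      else PySem.Chars.rfind.go s sub j := rfl

-- rfind.go finds the highest occurrence: if sub occurs at p and nowhere in (p, j], go = p
theorem pvGoEq (s sub : List Char) (p : Nat) :
    ∀ j, p ≤ j → sub.isPrefixOf (s.drop p) = true →
    (∀ t, p < t → t ≤ j → sub.isPrefixOf (s.drop t) = false) →
    PySem.Chars.rfind.go s sub j = (p : Int) := by
  intro j
  induction j with
  | zero =>
    intro hpj hp _
    have : p = 0 := by omega
    subst this
    rw [pvGoZero]
    simpa using hp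
  | succ j ih =>
    intro hpj hp hno
    rw [pvGoSucc]
    by_cases hcase : p = j + 1
    · subst hcase; rw [if_pos hp]
    · have hle : p ≤ j := by omega
      rw [if_neg (by rw [hno (j + 1) (by omega) (le_refl _)]; simp)]
      exact ih hle hp (fun t h1 h2 => hno t h1 (by omega))

theorem pvRfindEq (s sub : List Char) (p : Nat) (hps : p ≤ s.length)
    (hp : sub.isPrefixOf (s.drop p) = true)
    (hno : ∀ t, p < t → t ≤ s.length → sub.isPrefixOf (s.drop t) = false) :
    PySem.Chars.rfind s sub = (p : Int) :=
  pvGoEq s sub p s.length hps hp hno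

-- whenever sub occurs at or below j, go returns a position where sub occurs
theorem pvGoFound (s sub : List Char) :
    ∀ j, (∃ t, t ≤ j ∧ sub.isPrefixOf (s.drop t) = true) →
    ∃ p : Nat, PySem.Chars.rfind.go s sub j = (p : Int) ∧ sub.isPrefixOf (s.drop p) = true := by
  intro j
  induction j with
  | zero =>
    rintro ⟨t, ht, hp⟩
    have : t = 0 := by omega
    subst this
    refine ⟨0, ?_, hp⟩
    rw [pvGoZero]
    simpa using hp
  | succ j ih =>
    rintro ⟨t, ht, hp⟩
    rw [pvGoSucc]
    by_cases hc : sub.isPrefixOf (s.drop (j + 1)) = true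
    · exact ⟨j + 1, by rw [if_pos hc], hc⟩
    · have htj : t ≤ j := by
        rcases Nat.lt_or_ge t (j + 1) with h | h
        · omega
        · exfalso
          have : t = j + 1 := by omega
          subst this; exact hc hp
      rw [if_neg hc]
      exact ih ⟨t, htj, hp⟩

theorem pvRfindFound (s sub : List Char) (h : PySem.Chars.isIn sub s = true) :
    ∃ p : Nat, PySem.Chars.rfind s sub = (p : Int) ∧ sub.isPrefixOf (s.drop p) = true := by
  rw [PySem.Chars.isIn_iff_infix] at h
  obtain ⟨pre, post, hdec⟩ := h
  apply pvGoFound s sub s.length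
  refine ⟨pre.length, ?_, ?_⟩
  · subst hdec; simp
  · have : s.drop pre.length = sub ++ post := by
      subst hdec; rw [List.append_assoc, List.drop_left]
    rw [this]
    exact List.isPrefixOf_iff_prefix.mpr ⟨post, rfl⟩

theorem pvTakeApp (l1 l2 : List Char) (n : Nat) :
    (l1 ++ l2).take (l1.length + n) = l1 ++ l2.take n := by
  induction l1 with
  | nil => simp
  | cons x t ih => simp [Nat.succ_add, ih]

theorem pvDropApp (l1 l2 : List Char) (n : Nat) :
    (l1 ++ l2).drop (l1.length + n) = l2.drop n := by
  induction l1 with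
  | nil => simp
  | cons x t ih => simp [Nat.succ_add, ih]

-- the trailing digit run of a ++ d, where d is all digits and a does not end in a digit
theorem pvDigitRunEq (a d : List Char)
    (hd : ∀ c ∈ d, PySem.Chars.isdigit c = true)
    (ha : ∀ c, a.getLast? = some c → PySem.Chars.isdigit c = false) :
    pvDigitRun (a ++ d) = d.length := by
  unfold pvDigitRun
  rw [List.reverse_append]
  rw [List.takeWhile_append_of_pos (by intro x hx; exact hd x (List.mem_reverse.mp hx))]
  have hz : a.reverse.takeWhile PySem.Chars.isdigit = [] := by
    cases hrev : a.reverse with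
    | nil => simp
    | cons x t =>
      have hx : a.getLast? = some x := by
        rw [← List.head?_reverse, hrev]; rfl
      simp [ha x hx]
  simp [hz]

-- canonical split of n at the trailing-digit boundary
theorem pvSplit (m : List Char) :
    ∃ a d : List Char, m = a ++ d ∧ a.length = m.length - pvDigitRun m ∧
      d.length = pvDigitRun m ∧ (∀ c ∈ d, PySem.Chars.isdigit c = true) ∧
      (∀ c, a.getLast? = some c → PySem.Chars.isdigit c = false) := by
  have hsum : (m.reverse.takeWhile PySem.Chars.isdigit).length
      + (m.reverse.dropWhile PySem.Chars.isdigit).length = m.length := by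
    rw [← List.length_append, List.takeWhile_append_dropWhile]
    simp
  refine ⟨(m.reverse.dropWhile PySem.Chars.isdigit).reverse,
         (m.reverse.takeWhile PySem.Chars.isdigit).reverse, ?_, ?_, ?_, ?_, ?_⟩
  · rw [← List.reverse_append, List.takeWhile_append_dropWhile, List.reverse_reverse]
  · unfold pvDigitRun
    simp
    omega
  · simp [pvDigitRun]
  · intro c hc
    exact List.mem_takeWhile_imp (List.mem_reverse.mp hc)
  · intro c hc
    rw [List.getLast?_reverse] at hc
    have := List.head?_dropWhile_not PySem.Chars.isdigit m.reverse
    rw [hc] at this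
    exact this

-- if A's branch for separator ['_', c2] returns, the input has B's shape
theorem pvFire (m : List Char) (c2 : Char) (hc2 : PySem.Chars.isdigit c2 = false) (r : Nat)
    (hpre : ['_', c2].isPrefixOf (m.drop r) = true)
    (hdig : PySem.Chars.strIsdigit (m.drop (r + 2)) = true) :
    m.length - pvDigitRun m = r + 2 ∧ r + 2 < m.length ∧
      PySem.Chars.endswith (m.take (r + 2)) ['_', c2] = true := by
  obtain ⟨rest, hrest⟩ := (pvPrefixTwo '_' c2 (m.drop r)).mp hpre
  have hrlen : r < m.length := by
    by_contra h
    have : m.drop r = [] := List.drop_eq_nil_of_le (by omega)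
    rw [this] at hrest; simp at hrest
  have hm : m = m.take r ++ '_' :: c2 :: rest := by
    conv_lhs => rw [← List.take_append_drop r m]
    rw [hrest]
  have htr : (m.take r).length = r := by simp; omega
  have hdrop2 : m.drop (r + 2) = rest := by
    have h2 : m.drop (r + 2) = (m.drop r).drop 2 := by rw [List.drop_drop]
    rw [h2, hrest]; rfl
  rw [hdrop2] at hdig
  simp [PySem.Chars.strIsdigit] at hdig
  obtain ⟨hne, hall⟩ := hdig
  have hrun : pvDigitRun m = rest.length := by
    have hm' : m = (m.take r ++ ['_', c2]) ++ rest := by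
      conv_lhs => rw [hm]
      simp
    rw [hm']
    apply pvDigitRunEq
    · intro c hc; exact hall c hc
    · intro c hc
      have he : (m.take r ++ ['_', c2]) = (m.take r ++ ['_']) ++ [c2] := by simp
      rw [he, List.getLast?_concat] at hc
      injection hc with hc
      rw [← hc]; exact hc2
  have hlen : m.length = r + 2 + rest.length := by
    conv_lhs => rw [hm]
    simp [htr]
    omega
  have hrest_pos : 0 < rest.length := List.length_pos_iff.mpr hne
  refine ⟨by omega, by omega, ?_⟩
  have htake : m.take (r + 2) = m.take r ++ ['_', c2] := by
    have h3 := pvTakeApp (m.take r) ('_' :: c2 :: rest) 2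
    rw [htr] at h3
    calc m.take (r + 2) = (m.take r ++ '_' :: c2 :: rest).take (r + 2) := by rw [← hm]
      _ = m.take r ++ ('_' :: c2 :: rest).take 2 := h3
      _ = m.take r ++ ['_', c2] := rfl
  rw [htake, PySem.Chars.endswith_iff]
  exact ⟨m.take r, rfl⟩

-- last occurrence of ['_', c2] in b ++ '_' :: c2 :: d (d all digits) is at b.length
theorem pvLast (b d : List Char) (c2 : Char) (hq : c2 ≠ '_')
    (hd : ∀ c ∈ d, PySem.Chars.isdigit c = true) :
    PySem.Chars.rfind (b ++ '_' :: c2 :: d) ['_', c2] = (b.length : Int) := by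
  apply pvRfindEq
  · simp
  · rw [List.drop_left]
    exact (pvPrefixTwo _ _ _).mpr ⟨d, rfl⟩
  · intro t h1 h2
    by_contra hcon
    rw [Bool.not_eq_false] at hcon
    obtain ⟨rest, hrest⟩ := (pvPrefixTwo '_' c2 _).mp hcon
    have hget : (b ++ '_' :: c2 :: d)[t]? = some '_' := by
      have h0 : ((b ++ '_' :: c2 :: d).drop t)[0]? = some '_' := by rw [hrest]; rfl
      rw [List.getElem?_drop] at h0
      simpa using h0
    rw [List.getElem?_append_right (by omega)] at hget
    rcases Nat.exists_eq_add_of_lt h1 with ⟨u, hu⟩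
    rcases Nat.eq_zero_or_pos u with h | h
    · subst h
      have he : t - b.length = 1 := by omega
      rw [he] at hget
      simp at hget
      exact hq hget
    · have he : t - b.length = (u - 1) + 2 := by omega
      rw [he] at hget
      simp at hget
      have hmem : '_' ∈ d := List.mem_of_getElem? hget
      have := hd '_' hmem
      simp [PySem.Chars.isdigit] at this

theorem pvIsInQ (b d : List Char) (c2 : Char) :
    PySem.Chars.isIn ['_', c2] (b ++ '_' :: c2 :: d) = true := by
  rw [PySem.Chars.isIn_iff_infix]
  exact ⟨b, d, by simp⟩

-- a loop step falls through when the digit check cannot succeed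
theorem pvStep (suf : List Char) (rest : List (List Char)) (m : List Char)
    (h : PySem.Chars.isIn suf m = true →
      PySem.Chars.strIsdigit (m.drop ((PySem.Chars.rfind m suf).toNat + suf.length)) = false) :
    pvSufLoop (suf :: rest) m = pvSufLoop rest m := by
  simp only [pvSufLoop, pvRsplitLast]
  cases hin : PySem.Chars.isIn suf m
  · simp
  · simp [h hin]

-- the fall-through condition follows from B's guards failing
theorem pvNoFire (m : List Char) (c2 : Char) (hc2 : PySem.Chars.isdigit c2 = false)
    (h : PySem.Chars.endswith (m.take (m.length - pvDigitRun m)) ['_', c2] = false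
        ∨ ¬ (m.length - pvDigitRun m < m.length)) :
    PySem.Chars.isIn ['_', c2] m = true →
      PySem.Chars.strIsdigit (m.drop ((PySem.Chars.rfind m ['_', c2]).toNat + (['_', c2] : List Char).length)) = false := by
  intro hin
  obtain ⟨p, hrf, hpre⟩ := pvRfindFound m _ hin
  rw [hrf]
  by_contra hcon
  rw [Bool.not_eq_false] at hcon
  have hcon' : PySem.Chars.strIsdigit (m.drop (p + 2)) = true := by
    simpa using hcon
  obtain ⟨heq, hlt2, hends⟩ := pvFire m c2 hc2 p hpre hcon'
  rcases h with h | h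
  · rw [← heq] at hends
    rw [h] at hends
    exact Bool.false_ne_true hends
  · exact h (by omega)

-- a loop step that fires returns the prefix before the separator
theorem pvStepFire (m b d : List Char) (c2 : Char) (rest : List (List Char)) (hq : c2 ≠ '_')
    (hd : ∀ c ∈ d, PySem.Chars.isdigit c = true) (hdne : d ≠ [])
    (hm : m = b ++ '_' :: c2 :: d) :
    pvSufLoop (['_', c2] :: rest) m = b := by
  have hin : PySem.Chars.isIn ['_', c2] m = true := by rw [hm]; exact pvIsInQ b d c2
  have hrf : PySem.Chars.rfind m ['_', c2] = (b.length : Int) := by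
    rw [hm]; exact pvLast b d c2 hq hd
  have hdrop : m.drop (b.length + 2) = d := by
    rw [hm]
    simp [pvDropApp b ('_' :: c2 :: d) 2]
  have hdig : PySem.Chars.strIsdigit (m.drop (b.length + 2)) = true := by
    rw [hdrop]
    simp [PySem.Chars.strIsdigit, hdne]
    intro c hc
    exact hd c hc
  have htk : m.take b.length = b := by
    rw [hm]
    simp
  simp only [pvSufLoop, pvRsplitLast, hin, if_true, hrf]
  simp only [Int.toNat_natCast, List.length_cons, List.length_nil]
  rw [show (0 : Nat) + 1 + 1 = 2 from rfl] at *
  simp only [hdig, if_true, htk]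

-- the core equivalence on the stripped character list
theorem pvCore (m : List Char) : pvSufLoop [['_', 'q'], ['_', 'p']] m = pvAltCore m := by
  obtain ⟨a, d, hm, hal, hdl, hd, hla⟩ := pvSplit m
  have htake : m.take (m.length - pvDigitRun m) = a := by
    rw [← hal]
    conv_lhs => rw [hm]
    exact List.take_left
  unfold pvAltCore
  by_cases hlt : m.length - pvDigitRun m < m.length
  · rw [if_pos hlt, htake]
    have hdne : d ≠ [] := by
      intro h
      subst h
      simp at hdl
      omega
    by_cases hq : PySem.Chars.endswith a ['_', 'q'] = true
    · rw [if_pos hq]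
      obtain ⟨b, hb⟩ := (PySem.Chars.endswith_iff a ['_', 'q']).mp hq
      have hmq : m = b ++ '_' :: 'q' :: d := by rw [hm, ← hb]; simp
      rw [pvStepFire m b d 'q' _ (by decide) hd hdne hmq]
      have hab : a = b ++ ['_', 'q'] := hb.symm
      rw [hab]
      have hlen2 : (b ++ ['_', 'q'] : List Char).length - 2 = b.length := by simp
      rw [hlen2, List.take_left]
    · rw [if_neg hq]
      by_cases hp : PySem.Chars.endswith a ['_', 'p'] = true
      · rw [if_pos hp]
        obtain ⟨b, hb⟩ := (PySem.Chars.endswith_iff a ['_', 'p']).mp hp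
        have hmp : m = b ++ '_' :: 'p' :: d := by rw [hm, ← hb]; simp
        rw [pvStep _ _ _ (pvNoFire m 'q' (by decide) (Or.inl (by rw [htake]; simpa using hq)))]
        rw [pvStepFire m b d 'p' _ (by decide) hd hdne hmp]
        have hab : a = b ++ ['_', 'p'] := hb.symm
        rw [hab]
        have hlen2 : (b ++ ['_', 'p'] : List Char).length - 2 = b.length := by simp
        rw [hlen2, List.take_left]
      · rw [if_neg hp]
        rw [pvStep _ _ _ (pvNoFire m 'q' (by decide) (Or.inl (by rw [htake]; simpa using hq)))]
        rw [pvStep _ _ _ (pvNoFire m 'p' (by decide) (Or.inl (by rw [htake]; simpa using hp)))]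
        rfl
  · rw [if_neg hlt]
    rw [pvStep _ _ _ (pvNoFire m 'q' (by decide) (Or.inr hlt))]
    rw [pvStep _ _ _ (pvNoFire m 'p' (by decide) (Or.inr hlt))]
    rfl

-- ===== VERDICT (by name: the statement is the Claim_ definition above) =====
theorem strip_q_suffix_py_spec : Claim_equal_strip_q_suffix_py := by
  intro name _
  unfold Spec_strip_q_suffix_py strip_q_suffix_py strip_q_suffix_py_alt
  exact congrArg String.ofList (pvCore _)
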